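-- pv_equiv track=rewrite | github.com/rummykhan/hacker-rank | careem/min-sum.py | getMinimumUniqueSum
-- ===== SOURCE A (Python) =====
-- MAX_VALUE = 5001
--
-- def getMinimumUniqueSum(arr):
--     unique = set()
--     for a in arr:
--         for x in range(a, MAX_VALUE):
--             if x not in unique:
--                 break
--         unique.add(x)
--     return sum(unique)
-- ===== SOURCE B (Python) =====
-- MAX_VALUE = 5001
--
-- def getMinimumUniqueSum(arr):
--     # Sort the values below MAX_VALUE once, then assign each the smallest
--     # free integer >= it as max(value, previous assignment + 1); values that
--     # would need an assignment >= MAX_VALUE get none (matching A's capped scan).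
--     total = 0
--     prev = None
--     for a in sorted(x for x in arr if x < MAX_VALUE):
--         v = a if prev is None or a > prev else prev + 1
--         if v >= MAX_VALUE:
--             break
--         total += v
--         prev = v
--     return total
-- ===== Notes on version B (the rewrite author's own statement) =====
-- stated objective: faster
-- what changed: Instead of keeping a set and linearly scanning from each value up to MAX_VALUE for a free slot (O(n*MAX)), B sorts the values once and assigns each element max(value, prev+1) in a single pass, summing assignments below MAX_VALUE (O(n log n)).
import Mathlib
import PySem

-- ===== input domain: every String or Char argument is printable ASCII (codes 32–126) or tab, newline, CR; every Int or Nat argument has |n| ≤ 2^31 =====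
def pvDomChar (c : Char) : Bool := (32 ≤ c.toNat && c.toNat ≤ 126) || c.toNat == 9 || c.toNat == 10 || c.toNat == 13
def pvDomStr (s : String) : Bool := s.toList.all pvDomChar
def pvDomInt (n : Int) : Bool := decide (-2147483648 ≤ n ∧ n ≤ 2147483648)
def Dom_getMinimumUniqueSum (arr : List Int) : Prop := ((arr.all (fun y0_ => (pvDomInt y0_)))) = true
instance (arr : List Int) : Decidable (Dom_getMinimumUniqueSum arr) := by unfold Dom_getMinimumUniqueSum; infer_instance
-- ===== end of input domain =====

-- B sorts the values once and assigns max(value, prev+1) in a single pass instead of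
-- A's linear scan of a set from each value up to MAX_VALUE; return values proved equal.

-- ===== PORT A =====
-- 'for x in range(a, MAX_VALUE): if x not in unique: break' — fuel = number of steps left after x
def pvScan (s : PySem.Set Int) (x : Int) : Nat → Int
  | 0 => x
  | f + 1 => if PySem.Set.contains s x then pvScan s (x + 1) f else x

-- the Option Int carries the loop variable x (none before its first assignment:
-- reading it then is Python's UnboundLocalError, modelled as an overall none)
def pvLoopA : List Int → PySem.Set Int → Option Int → Option (PySem.Set Int)
  | [], s, _ => some s
  | a :: rest, s, xo =>
    if a < 5001 then
      let x := pvScan s a (5000 - a).toNat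
      pvLoopA rest (PySem.Set.add s x) (some x)
    else
      match xo with
      | none => none
      | some x => pvLoopA rest (PySem.Set.add s x) (some x)

def getMinimumUniqueSum (arr : List Int) : Int :=
  match pvLoopA arr PySem.Set.empty none with
  | some s => s.sum
  | none => 0  -- Python raises UnboundLocalError here; excluded by Pre_

-- ===== PORT B =====
def pvLoopB : List Int → Int → Option Int → Int
  | [], total, _ => total
  | a :: rest, total, prev =>
    let v : Int := match prev with
      | none => a
      | some p => if a > p then a else p + 1
    if 5001 ≤ v then total
    else pvLoopB rest (total + v) (some v)

def getMinimumUniqueSum_alt (arr : List Int) : Int :=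
  pvLoopB (PySem.List.sorted (arr.filter (fun x => x < 5001)) (fun x => x) false) 0 none

-- ===== PRECONDITION & SPEC =====
-- Pre_ excludes exactly the inputs whose FIRST element is ≥ MAX_VALUE = 5001: there the
-- scan's range is empty on the first iteration and A raises UnboundLocalError.
def Pre_getMinimumUniqueSum (arr : List Int) : Prop := ∀ a ∈ arr.take 1, a < 5001
instance (arr : List Int) : Decidable (Pre_getMinimumUniqueSum arr) := by
  unfold Pre_getMinimumUniqueSum; infer_instance
def pvWitness_getMinimumUniqueSum : List Int := [3, 1, 3, 5000]

def Spec_getMinimumUniqueSum (arr : List Int) (out : Int) : Prop := out = getMinimumUniqueSum_alt arr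
instance (arr : List Int) (out : Int) : Decidable (Spec_getMinimumUniqueSum arr out) := by
  unfold Spec_getMinimumUniqueSum; infer_instance

-- ===== CLAIM (what is proved, stated in full; the proofs are below) =====
def Claim_equal_getMinimumUniqueSum : Prop := ∀ (arr : List Int), Dom_getMinimumUniqueSum arr → Pre_getMinimumUniqueSum arr → Spec_getMinimumUniqueSum arr (getMinimumUniqueSum arr)
-- ===== LEMMAS AND PROOFS =====

-- Abstract greedy step on finite sets: gnf scans for the first value ∉ t (the value of
-- Python's loop variable x after the inner for), gstep inserts it.
def gnf (t : Finset Int) (x : Int) : Nat → Int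
  | 0 => x
  | f + 1 => if x ∈ t then gnf t (x + 1) f else x

def gstep (t : Finset Int) (a : Int) : Finset Int :=
  if a < 5001 then insert (gnf t a (5000 - a).toNat) t else t

theorem gnf_le (t : Finset Int) : ∀ (f : Nat) (x : Int), x ≤ gnf t x f := by
  intro f
  induction f with
  | zero => intro x; simp [gnf]
  | succ f ih =>
    intro x
    simp only [gnf]
    split
    · exact le_trans (by omega) (ih (x + 1))
    · exact le_refl x

theorem gnf_le_add (t : Finset Int) : ∀ (f : Nat) (x : Int), gnf t x f ≤ x + f := by
  intro f
  induction f with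
  | zero => intro x; simp [gnf]
  | succ f ih =>
    intro x
    simp only [gnf]
    split
    · have := ih (x + 1); push_cast; push_cast at this; omega
    · push_cast; omega

theorem gnf_mem_of_lt (t : Finset Int) :
    ∀ (f : Nat) (x y : Int), x ≤ y → y < gnf t x f → y ∈ t := by
  intro f
  induction f with
  | zero => intro x y h1 h2; simp [gnf] at h2; omega
  | succ f ih =>
    intro x y h1 h2
    simp only [gnf] at h2
    split at h2
    · rcases eq_or_lt_of_le h1 with h | h
      · subst h; assumption
      · exact ih (x + 1) y (by omega) h2
    · omega

theorem gnf_not_mem_or (t : Finset Int) :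
    ∀ (f : Nat) (x : Int), gnf t x f ∉ t ∨ gnf t x f = x + f := by
  intro f
  induction f with
  | zero => intro x; right; simp [gnf]
  | succ f ih =>
    intro x
    simp only [gnf]
    split
    · rcases ih (x + 1) with h | h
      · exact Or.inl h
      · right; rw [h]; push_cast; ring
    · exact Or.inl (by assumption)

theorem gnf_eq_of (t : Finset Int) :
    ∀ (f : Nat) (x v : Int), x ≤ v → v ≤ x + f → (∀ y, x ≤ y → y < v → y ∈ t) →
      v ∉ t → gnf t x f = v := by
  intro f
  induction f with
  | zero =>
    intro x v h1 h2 _ _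
    simp [gnf]; omega
  | succ f ih =>
    intro x v h1 h2 h3 h4
    simp only [gnf]
    rcases eq_or_lt_of_le h1 with h | h
    · subst h; rw [if_neg h4]
    · rw [if_pos (h3 x le_rfl h)]
      exact ih (x + 1) v (by omega) (by push_cast at h2 ⊢; omega)
        (fun y hy1 hy2 => h3 y (by omega) hy2) h4

theorem gnf_full (t : Finset Int) :
    ∀ (f : Nat) (x : Int), (∀ y, x ≤ y → y ≤ x + f → y ∈ t) → gnf t x f = x + f := by
  intro f
  induction f with
  | zero => intro x _; simp [gnf]
  | succ f ih =>
    intro x h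
    simp only [gnf]
    rw [if_pos (h x le_rfl (by push_cast; omega))]
    rw [ih (x + 1) (fun y hy1 hy2 => h y (by omega) (by push_cast at hy2 ⊢; omega))]
    push_cast; ring

-- the scanned value for a ≤ 5000
def nfree (t : Finset Int) (a : Int) : Int := gnf t a (5000 - a).toNat

theorem nfree_cast (a : Int) (h : a ≤ 5000) : ((5000 - a).toNat : Int) = 5000 - a :=
  Int.toNat_of_nonneg (by omega)

theorem nfree_le (t : Finset Int) (a : Int) : a ≤ nfree t a := gnf_le t _ a

theorem nfree_le5000 (t : Finset Int) (a : Int) (h : a ≤ 5000) : nfree t a ≤ 5000 := by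
  have := gnf_le_add t (5000 - a).toNat a
  rw [nfree_cast a h] at this
  unfold nfree; omega

theorem nfree_mem_of_lt (t : Finset Int) (a y : Int) (h1 : a ≤ y) (h2 : y < nfree t a) :
    y ∈ t := gnf_mem_of_lt t _ a y h1 h2

theorem nfree_not_mem_or (t : Finset Int) (a : Int) (h : a ≤ 5000) :
    nfree t a ∉ t ∨ nfree t a = 5000 := by
  rcases gnf_not_mem_or t (5000 - a).toNat a with h' | h'
  · exact Or.inl h'
  · right; rw [nfree_cast a h] at h'; unfold nfree; omega

theorem nfree_eq_of (t : Finset Int) (a v : Int) (h : a ≤ 5000) (h1 : a ≤ v)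
    (h2 : v ≤ 5000) (h3 : ∀ y, a ≤ y → y < v → y ∈ t) (h4 : v ∉ t) : nfree t a = v := by
  apply gnf_eq_of t _ a v h1 _ h3 h4
  rw [nfree_cast a h]; omega

theorem nfree_full (t : Finset Int) (a : Int) (h : a ≤ 5000)
    (hf : ∀ y, a ≤ y → y ≤ 5000 → y ∈ t) : nfree t a = 5000 := by
  have := gnf_full t (5000 - a).toNat a
    (fun y hy1 hy2 => hf y hy1 (by rw [nfree_cast a h] at hy2; omega))
  rw [nfree_cast a h] at this
  unfold nfree; omega

theorem gstep_eq_insert (t : Finset Int) (a : Int) (h : a < 5001) :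
    gstep t a = insert (nfree t a) t := by
  unfold gstep nfree; rw [if_pos h]

theorem gstep_eq_self_of_ge (t : Finset Int) (a : Int) (h : ¬ a < 5001) : gstep t a = t := by
  unfold gstep; rw [if_neg h]

theorem subset_gstep (t : Finset Int) (a : Int) : t ⊆ gstep t a := by
  unfold gstep; split
  · exact Finset.subset_insert _ t
  · exact subset_rfl

theorem gstep_eq_self_of_full (t : Finset Int) (a : Int)
    (hf : ∀ y, a ≤ y → y ≤ 5000 → y ∈ t) : gstep t a = t := by
  by_cases h : a < 5001
  · rw [gstep_eq_insert t a h, nfree_full t a (by omega) hf]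
    exact Finset.insert_eq_self.2 (hf 5000 (by omega) le_rfl)
  · exact gstep_eq_self_of_ge t a h

-- full-segment condition [a,5000] ⊆ t, derived when the scan lands on a member of t
theorem full_of_mem (t : Finset Int) (a : Int) (h : a ≤ 5000) (hm : nfree t a ∈ t) :
    ∀ y, a ≤ y → y ≤ 5000 → y ∈ t := by
  rcases nfree_not_mem_or t a h with h' | h'
  · exact absurd hm h'
  · intro y hy1 hy2
    rcases eq_or_lt_of_le hy2 with h'' | h''
    · rw [← h'] at h''; rw [h'']; exact hm
    · exact nfree_mem_of_lt t a y hy1 (by omega)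

-- the key order-independence fact
theorem gstep_comm (t : Finset Int) (a b : Int) :
    gstep (gstep t a) b = gstep (gstep t b) a := by
  by_cases ha : a < 5001
  · by_cases hb : b < 5001
    · have ha' : a ≤ 5000 := by omega
      have hb' : b ≤ 5000 := by omega
      by_cases hpt : nfree t a ∈ t
      · -- [a,5000] is full: the a-step is a no-op now and stays one after the b-step
        have hfull := full_of_mem t a ha' hpt
        rw [gstep_eq_self_of_full t a hfull,
          gstep_eq_self_of_full (gstep t b) a
            (fun y hy1 hy2 => subset_gstep t b (hfull y hy1 hy2))]
      · by_cases hqt : nfree t b ∈ t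
        · have hfull := full_of_mem t b hb' hqt
          rw [gstep_eq_self_of_full t b hfull,
            gstep_eq_self_of_full (gstep t a) b
              (fun y hy1 hy2 => subset_gstep t a (hfull y hy1 hy2))]
        · set p := nfree t a with hp
          set q := nfree t b with hq
          by_cases hpq : p = q
          · -- both scans land on the same free slot p; after inserting it both
            -- continuations scan to the same next slot
            have key : nfree (insert p t) b = nfree (insert p t) a := by
              set r := nfree (insert p t) a with hr
              have hra : a ≤ r := nfree_le _ a
              have hr5 : r ≤ 5000 := nfree_le5000 _ a ha'
              have hap : a ≤ p := nfree_le t a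
              have hbp : b ≤ p := by rw [hpq]; exact nfree_le t b
              have hsegA : ∀ y, a ≤ y → y < p → y ∈ t := fun y h1 h2 => nfree_mem_of_lt t a y h1 h2
              have hsegB : ∀ y, b ≤ y → y < p → y ∈ t := by
                intro y h1 h2
                apply nfree_mem_of_lt t b y h1
                rw [← hq, ← hpq]; exact h2
              by_cases hrt : r ∈ insert p t
              · -- full from a; then also full from b
                have hfullA := full_of_mem (insert p t) a ha' hrt
                have hfullB : ∀ y, b ≤ y → y ≤ 5000 → y ∈ insert p t := by
                  intro y h1 h2
                  by_cases hya : a ≤ y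
                  · exact hfullA y hya h2
                  · have : y < p := by omega
                    exact Finset.mem_insert_of_mem (hsegB y h1 this)
                rw [nfree_full _ b hb' hfullB, hr, nfree_full _ a ha' hfullA]
              · -- r is the next free slot above p, from either start
                have hrp : p < r := by
                  rcases lt_or_ge p r with h | h
                  · exact h
                  · exact absurd (by
                      rcases eq_or_lt_of_le h with h' | h'
                      · rw [h']; exact Finset.mem_insert_self p t
                      · exact Finset.mem_insert_of_mem (hsegA r hra h')) hrt
                apply nfree_eq_of _ b r hb' (by omega) hr5 _ hrt
                intro y h1 h2
                by_cases hyp : y < p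
                · exact Finset.mem_insert_of_mem (hsegB y h1 hyp)
                · rcases eq_or_lt_of_le (le_of_not_gt hyp) with h' | h'
                  · rw [← h']; exact Finset.mem_insert_self p t
                  · exact nfree_mem_of_lt (insert p t) a y (by omega) h2
            rw [gstep_eq_insert t a ha, gstep_eq_insert t b hb, ← hp, ← hq, ← hpq,
              gstep_eq_insert (insert p t) b hb, gstep_eq_insert (insert p t) a ha, key]
          · -- distinct free slots: each insertion leaves the other scan unchanged
            have h1 : nfree (insert p t) b = q := by
              apply nfree_eq_of _ b q hb' (nfree_le t b) (nfree_le5000 t b hb')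
              · intro y hy1 hy2
                exact Finset.mem_insert_of_mem (nfree_mem_of_lt t b y hy1 hy2)
              · simp only [Finset.mem_insert]
                push Not
                exact ⟨fun h => hpq h.symm, hqt⟩
            have h2 : nfree (insert q t) a = p := by
              apply nfree_eq_of _ a p ha' (nfree_le t a) (nfree_le5000 t a ha')
              · intro y hy1 hy2
                exact Finset.mem_insert_of_mem (nfree_mem_of_lt t a y hy1 hy2)
              · simp only [Finset.mem_insert]
                push Not
                exact ⟨hpq, hpt⟩
            rw [gstep_eq_insert t a ha, gstep_eq_insert t b hb, ← hp, ← hq,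
              gstep_eq_insert (insert p t) b hb, gstep_eq_insert (insert q t) a ha,
              h1, h2, Finset.insert_comm]
    · rw [gstep_eq_self_of_ge t b hb, gstep_eq_self_of_ge (gstep t a) b hb]
  · rw [gstep_eq_self_of_ge t a ha, gstep_eq_self_of_ge (gstep t b) a ha]

theorem foldl_gstep_filter (l : List Int) (t : Finset Int) :
    l.foldl gstep t = (l.filter (fun x => x < 5001)).foldl gstep t := by
  induction l generalizing t with
  | nil => rfl
  | cons a rest ih =>
    by_cases h : a < 5001
    · simp [h, ih]
    · simp only [List.foldl_cons, List.filter_cons]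
      rw [gstep_eq_self_of_ge t a h]
      simp [h, ih t]

theorem foldl_gstep_no_op (a : Int) (l : List Int) (t : Finset Int)
    (hf : ∀ y, a ≤ y → y ≤ 5000 → y ∈ t) (hl : ∀ b ∈ l, a ≤ b) :
    l.foldl gstep t = t := by
  induction l with
  | nil => rfl
  | cons b rest ih =>
    simp only [List.foldl_cons]
    rw [gstep_eq_self_of_full t b (fun y h1 h2 => hf y (le_trans (hl b (by simp)) h1) h2)]
    exact ih (fun c hc => hl c (by simp [hc]))

-- ===== A's loop = fold of gstep =====

-- total version of pvLoopA once x is bound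
def runA : List Int → PySem.Set Int → Int → PySem.Set Int
  | [], s, _ => s
  | a :: rest, s, x =>
    if a < 5001 then
      let y := pvScan s a (5000 - a).toNat
      runA rest (PySem.Set.add s y) y
    else runA rest (PySem.Set.add s x) x

theorem pvLoopA_eq_runA (l : List Int) (s : PySem.Set Int) (x : Int) :
    pvLoopA l s (some x) = some (runA l s x) := by
  induction l generalizing s x with
  | nil => rfl
  | cons a rest ih =>
    simp only [pvLoopA, runA]
    split
    · exact ih _ _
    · exact ih _ _

theorem pvScan_eq_gnf (s : PySem.Set Int) : ∀ (f : Nat) (x : Int),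
    pvScan s x f = gnf s.toFinset x f := by
  intro f
  induction f with
  | zero => intro x; rfl
  | succ f ih =>
    intro x
    simp only [pvScan, gnf, List.mem_toFinset]
    by_cases h : x ∈ s
    · rw [if_pos ((PySem.Set.contains_iff s x).2 h), if_pos h, ih]
    · rw [if_neg (fun hc => h ((PySem.Set.contains_iff s x).1 hc)), if_neg h]

theorem toFinset_add (s : PySem.Set Int) (y : Int) :
    (PySem.Set.add s y).toFinset = insert y s.toFinset := by
  by_cases h : y ∈ s
  · rw [PySem.Set.add_of_mem h]
    exact (Finset.insert_eq_self.2 (List.mem_toFinset.2 h)).symm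
  · rw [PySem.Set.add_of_not_mem h]
    ext z
    simp [List.mem_toFinset]

theorem runA_spec (l : List Int) : ∀ (s : PySem.Set Int) (x : Int), x ∈ s → s.Nodup →
    (runA l s x).toFinset = l.foldl gstep s.toFinset ∧ (runA l s x).Nodup := by
  induction l with
  | nil => intro s x _ hnd; exact ⟨rfl, hnd⟩
  | cons a rest ih =>
    intro s x hx hnd
    simp only [runA, List.foldl_cons]
    by_cases ha : a < 5001
    · rw [if_pos ha]
      have hy : pvScan s a (5000 - a).toNat = nfree s.toFinset a := pvScan_eq_gnf s _ a
      have hmem : pvScan s a (5000 - a).toNat ∈ PySem.Set.add s (pvScan s a (5000 - a).toNat) :=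
        (PySem.Set.mem_add _ _ _).2 (Or.inr rfl)
      have hnd' : (PySem.Set.add s (pvScan s a (5000 - a).toNat)).Nodup :=
        PySem.Set.nodup_add _ _ hnd
      obtain ⟨h1, h2⟩ := ih _ _ hmem hnd'
      refine ⟨?_, h2⟩
      rw [h1, toFinset_add, hy, ← gstep_eq_insert s.toFinset a ha]
    · rw [if_neg ha]
      have hnd' : (PySem.Set.add s x).Nodup := PySem.Set.nodup_add _ _ hnd
      obtain ⟨h1, h2⟩ := ih _ _ ((PySem.Set.mem_add _ _ _).2 (Or.inl hx)) hnd'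
      refine ⟨?_, h2⟩
      rw [h1, PySem.Set.add_of_mem hx, gstep_eq_self_of_ge s.toFinset a ha]

theorem sum_nodup (s : PySem.Set Int) (h : s.Nodup) : s.sum = s.toFinset.sum id := by
  rw [List.sum_toFinset _ h, List.map_id]

theorem A_eq_fold (arr : List Int) (hpre : Pre_getMinimumUniqueSum arr) :
    getMinimumUniqueSum arr = (arr.foldl gstep ∅).sum id := by
  cases arr with
  | nil => rfl
  | cons a rest =>
    have ha : a < 5001 := hpre a (by simp)
    unfold getMinimumUniqueSum pvLoopA
    rw [if_pos ha]
    have hscan : pvScan PySem.Set.empty a (5000 - a).toNat = a := by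
      rw [pvScan_eq_gnf]
      have : (PySem.Set.empty : PySem.Set Int).toFinset = (∅ : Finset Int) := rfl
      rw [this]
      exact gnf_eq_of ∅ _ a a le_rfl (by omega) (by omega) (by simp)
    simp only [hscan]
    have hadd : PySem.Set.add (PySem.Set.empty : PySem.Set Int) a = [a] := rfl
    rw [hadd, pvLoopA_eq_runA]
    show (runA rest [a] a).sum = (List.foldl gstep ∅ (a :: rest)).sum id
    obtain ⟨h1, h2⟩ := runA_spec rest [a] a (by simp) (by simp)
    have hfin : ([a] : List Int).toFinset = gstep ∅ a := by
      rw [gstep_eq_insert ∅ a ha,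
        nfree_eq_of ∅ a a (by omega) le_rfl (by omega) (by omega) (by simp)]
      rfl
    rw [sum_nodup _ h2, h1, hfin, List.foldl_cons]

-- ===== B's loop = fold of gstep over the sorted list =====

theorem loopB_spec (l : List Int) : ∀ (t : Finset Int) (p : Int),
    l.Pairwise (· ≤ ·) → (∀ a ∈ l, a < 5001) →
    p ∈ t → (∀ y ∈ t, y ≤ p) → (∀ y, y ≤ p → (∃ a ∈ l, a ≤ y) → y ∈ t) →
    pvLoopB l (t.sum id) (some p) = (l.foldl gstep t).sum id := by
  induction l with
  | nil => intro t p _ _ _ _ _; rfl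
  | cons a rest ih =>
    intro t p hsort hlt hpmem hple hgap
    have ha : a < 5001 := hlt a (by simp)
    have hrest_ge : ∀ b ∈ rest, a ≤ b := fun b hb => (List.pairwise_cons.1 hsort).1 b hb
    have hrest_sort := (List.pairwise_cons.1 hsort).2
    have hrest_lt : ∀ b ∈ rest, b < 5001 := fun b hb => hlt b (by simp [hb])
    simp only [pvLoopB, List.foldl_cons]
    by_cases hap : a > p
    · rw [if_pos hap, if_neg (by omega : ¬ (5001 : Int) ≤ a)]
      have hnot : a ∉ t := fun h => absurd (hple a h) (by omega)
      have hstep : gstep t a = insert a t := by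
        rw [gstep_eq_insert t a ha,
          nfree_eq_of t a a (by omega) le_rfl (by omega) (by omega) hnot]
      have hsum : (insert a t).sum id = t.sum id + a := by
        rw [Finset.sum_insert hnot]; simp [add_comm]
      rw [hstep, ← ih (insert a t) a hrest_sort hrest_lt (Finset.mem_insert_self a t)
        (fun y hy => by
          rcases Finset.mem_insert.1 hy with h | h
          · omega
          · exact le_trans (hple y h) (by omega))
        (fun y hy1 hy2 => by
          obtain ⟨b, hb, hby⟩ := hy2
          have : a ≤ b := hrest_ge b hb
          have : y = a := by omega
          rw [this]; exact Finset.mem_insert_self a t), hsum]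
    · have hap' : a ≤ p := by omega
      rw [if_neg hap]
      have hfull_a : ∀ y, a ≤ y → y ≤ p → y ∈ t := fun y h1 h2 =>
        hgap y h2 ⟨a, by simp, h1⟩
      by_cases hp5 : p + 1 ≥ 5001
      · -- the slot pool [a,5000] is exhausted: every remaining step is a no-op
        rw [if_pos hp5]
        have hfull : ∀ y, a ≤ y → y ≤ 5000 → y ∈ t := fun y h1 h2 =>
          hfull_a y h1 (by omega)
        rw [gstep_eq_self_of_full t a hfull, foldl_gstep_no_op a rest t hfull hrest_ge]
      · rw [if_neg hp5]
        have hnot : p + 1 ∉ t := fun h => absurd (hple _ h) (by omega)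
        have hstep : gstep t a = insert (p + 1) t := by
          rw [gstep_eq_insert t a ha,
            nfree_eq_of t a (p + 1) (by omega) (by omega) (by omega)
              (fun y h1 h2 => hfull_a y h1 (by omega)) hnot]
        have hsum : (insert (p + 1) t).sum id = t.sum id + (p + 1) := by
          rw [Finset.sum_insert hnot]; simp [add_comm]
        rw [hstep, ← ih (insert (p + 1) t) (p + 1) hrest_sort hrest_lt
          (Finset.mem_insert_self _ t)
          (fun y hy => by
            rcases Finset.mem_insert.1 hy with h | h
            · omega
            · exact le_trans (hple y h) (by omega))
          (fun y hy1 hy2 => by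
            rcases eq_or_lt_of_le hy1 with h | h
            · rw [h]; exact Finset.mem_insert_self _ t
            · obtain ⟨b, hb, hby⟩ := hy2
              exact Finset.mem_insert_of_mem
                (hgap y (by omega) ⟨b, by simp [hb], hby⟩)), hsum]

theorem loopB_start (l : List Int) (hsort : l.Pairwise (· ≤ ·))
    (hlt : ∀ a ∈ l, a < 5001) : pvLoopB l 0 none = (l.foldl gstep ∅).sum id := by
  cases l with
  | nil => rfl
  | cons a rest =>
    have ha : a < 5001 := hlt a (by simp)
    simp only [pvLoopB, List.foldl_cons]
    rw [if_neg (by omega : ¬ (5001 : Int) ≤ a)]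
    have hstep : gstep (∅ : Finset Int) a = {a} := by
      rw [gstep_eq_insert ∅ a ha,
        nfree_eq_of ∅ a a (by omega) le_rfl (by omega) (by omega) (by simp)]
      rfl
    have hsum : (({a} : Finset Int)).sum id = 0 + a := by simp
    rw [hstep, ← loopB_spec rest {a} a (List.pairwise_cons.1 hsort).2
      (fun b hb => hlt b (by simp [hb])) (Finset.mem_singleton_self a)
      (fun y hy => by simp at hy; omega)
      (fun y hy1 hy2 => by
        obtain ⟨b, hb, hby⟩ := hy2
        have : a ≤ b := (List.pairwise_cons.1 hsort).1 b hb
        simp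
        omega), hsum]

-- ===== VERDICT (by name: the statement is the Claim_ definition above) =====
theorem getMinimumUniqueSum_spec : Claim_equal_getMinimumUniqueSum := by
  intro arr _dom hpre
  show getMinimumUniqueSum arr = getMinimumUniqueSum_alt arr
  set lF := arr.filter (fun x => x < 5001) with hlF
  set lS := PySem.List.sorted lF (fun x => x) false with hlS
  have hsort : lS.Pairwise (· ≤ ·) := PySem.List.sorted_pairwise lF (fun x => x) 
  have hlt : ∀ a ∈ lS, a < 5001 := by
    intro a ha
    rw [hlS, PySem.List.mem_sorted] at ha
    rw [hlF] at ha
    simpa using (List.mem_filter.1 ha).2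
  have hperm : lS.Perm lF := PySem.List.sorted_perm lF (fun x => x) false
  rw [A_eq_fold arr hpre]
  unfold getMinimumUniqueSum_alt
  rw [loopB_start lS hsort hlt]
  rw [foldl_gstep_filter arr ∅, ← hlF,
    hperm.foldl_eq' (fun x _ y _ z => gstep_comm z x y) ∅]
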